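-- pv_equiv track=rewrite | github.com/fortyMiles/CodeJam | round_G/round_C_p_a.py | large_a_n_frac
-- ===== SOURCE A (Python) =====
-- def large_a_n_frac(a, n, p):
--     if a % p == 0: return 0
--
--     res = 1
--
--     for i in range(1, n+1):
--         if i == 1: res = a % p
--         else:
--             res = pow(res, i, p)
--
--     return res
-- ===== SOURCE B (Python) =====
-- def _gcd(x, y):
--     while y:
--         x, y = y, x % y
--     return x
--
--
-- def _phi(m):
--     # Euler's totient by trial division, O(sqrt m)
--     result = m
--     x = m
--     q = 2
--     while q * q <= x:
--         if x % q == 0: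
--             while x % q == 0:
--                 x //= q
--             result -= result // q
--         q += 1
--     if x > 1:
--         result -= result // x
--     return result
--
--
-- def large_a_n_frac(a, n, p):
--     if a % p == 0:
--         return 0
--     if n < 1:
--         return 1
--     m = p if p > 0 else -p
--     r = a % m
--     # n! computed exactly while it stays below m
--     f = 1
--     i = 1
--     while i <= n and f < m:
--         f = f * i
--         i = i + 1
--     if f < m:
--         return pow(r, f, p)  # f == n! here
--     # here n! >= m: split m = u * v with u coprime to r and v | r**s
--     u = m
--     s = 0
--     g = _gcd(u, r)
--     while g > 1:
--         u = u // g
--         s = s + 1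
--         g = _gcd(u, r)
--     t = _phi(u)
--     # e = n! mod t, stopping early once the running product hits 0 mod t
--     e = 1
--     i = 1
--     while i <= n:
--         e = e * i % t
--         if e == 0:
--             break
--         i = i + 1
--     return pow(r, e + t * s, p)
-- ===== Notes on version B (the rewrite author's own statement) =====
-- stated objective: faster
-- what changed: A builds a^(n!) mod p by n successive modular exponentiations (one per factor of the exponent); B does one modular exponentiation after reducing the exponent n! via Euler's theorem: it splits |p| into a part coprime to the base (handled with the totient, computed by trial division) and a gcd-stripped part (where large powers vanish), computing n! mod phi with early-zero termination.
import Mathlib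
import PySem

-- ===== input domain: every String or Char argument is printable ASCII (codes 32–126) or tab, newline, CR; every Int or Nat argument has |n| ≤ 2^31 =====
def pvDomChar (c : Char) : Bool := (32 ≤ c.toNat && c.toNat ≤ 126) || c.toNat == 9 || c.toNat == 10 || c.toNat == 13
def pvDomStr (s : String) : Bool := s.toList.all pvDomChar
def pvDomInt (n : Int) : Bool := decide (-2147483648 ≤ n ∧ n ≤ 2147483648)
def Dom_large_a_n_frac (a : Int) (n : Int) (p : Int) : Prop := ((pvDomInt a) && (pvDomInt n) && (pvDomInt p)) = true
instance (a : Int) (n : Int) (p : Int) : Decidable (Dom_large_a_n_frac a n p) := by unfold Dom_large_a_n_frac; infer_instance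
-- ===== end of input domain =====

-- B replaces A's O(n) chain of modular powers (a^(n!) mod p built one factor of the
-- exponent at a time) by a single modular power whose exponent n! is reduced via
-- Euler's theorem on the part of |p| coprime to the base (totient by trial division,
-- gcd-stripping for the non-coprime part, early-zero factorial reduction): faster.

-- ===== PORT A =====
def large_a_n_frac (a : Int) (n : Int) (p : Int) : Int :=
  if PySem.Int.mod a p = 0 then 0
  else
    (PySem.List.pyRange 1 (n + 1) 1).foldl
      (fun res i => if i = 1 then PySem.Int.mod a p else PySem.Int.powMod res i.toNat p) 1

-- ===== PORT B =====
-- _gcd: hand-written Euclid from Source B (values are nonnegative Python ints)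
def bGcd (x y : Nat) : Nat :=
  if h : y = 0 then x else bGcd y (x % y)
termination_by y
decreasing_by exact Nat.mod_lt x (Nat.pos_of_ne_zero h)

-- inner `while x % q == 0: x //= q` of _phi; the conjuncts 2 ≤ q, x ≠ 0 are
-- totality guards only (always true when reached from bPhi)
def bStrip (q x : Nat) : Nat :=
  if h : x % q = 0 ∧ 2 ≤ q ∧ x ≠ 0 then bStrip q (x / q) else x
termination_by x
decreasing_by exact Nat.div_lt_self (Nat.pos_of_ne_zero h.2.2) h.2.1

-- needed for bPhiLoop's termination measure
theorem bStrip_le_self (q x : Nat) : bStrip q x ≤ x := by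
  unfold bStrip; split
  · exact le_trans (bStrip_le_self q (x / q)) (Nat.div_le_self x q)
  · exact le_refl x
termination_by x
decreasing_by rename_i h; exact Nat.div_lt_self (Nat.pos_of_ne_zero h.2.2) h.2.1

-- outer `while q * q <= x` loop of _phi, plus the trailing `if x > 1` step
def bPhiLoop (q x result : Nat) : Nat :=
  if q * q ≤ x then
    if x % q = 0 then bPhiLoop (q + 1) (bStrip q x) (result - result / q)
    else bPhiLoop (q + 1) x result
  else if 1 < x then result - result / x else result
termination_by 2 * x + 2 - q
decreasing_by
  · rename_i hqq _
    have h1 : bStrip q x ≤ x := bStrip_le_self q x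
    have h2 : q ≤ x ∨ q = 0 := by
      rcases Nat.eq_zero_or_pos q with h | h
      · exact Or.inr h
      · exact Or.inl (le_trans (Nat.le_mul_of_pos_left q h) hqq)
    omega
  · rename_i hqq _
    have h2 : q ≤ x ∨ q = 0 := by
      rcases Nat.eq_zero_or_pos q with h | h
      · exact Or.inr h
      · exact Or.inl (le_trans (Nat.le_mul_of_pos_left q h) hqq)
    omega

def bPhi (m : Nat) : Nat := bPhiLoop 2 m m

-- `while g > 1: u //= g; s += 1` loop; u ≠ 0 is a totality guard (u ≥ 1 on domain)
def bSplit (r u s : Nat) : Nat × Nat :=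
  let g := bGcd u r
  if h : 1 < g ∧ u ≠ 0 then bSplit r (u / g) (s + 1) else (u, s)
termination_by u
decreasing_by exact Nat.div_lt_self (Nat.pos_of_ne_zero h.2) h.1

-- `while i <= n and f < m: f *= i; i += 1`
def bFLoop (nN m i f : Nat) : Nat :=
  if i ≤ nN ∧ f < m then bFLoop nN m (i + 1) (f * i) else f
termination_by nN + 1 - i
decreasing_by omega

-- `while i <= n: e = e * i % t; if e == 0: break; i += 1`
def bELoop (nN t i e : Nat) : Nat :=
  if i ≤ nN then
    if e * i % t = 0 then 0 else bELoop nN t (i + 1) (e * i % t)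
  else e
termination_by nN + 1 - i
decreasing_by omega

def large_a_n_frac_alt (a : Int) (n : Int) (p : Int) : Int :=
  if PySem.Int.mod a p = 0 then 0
  else if n < 1 then 1
  else
    let m : Int := if p > 0 then p else -p
    let r : Int := PySem.Int.mod a m
    let mN : Nat := m.toNat
    let rN : Nat := r.toNat
    let nN : Nat := n.toNat
    let f := bFLoop nN mN 1 1
    if f < mN then PySem.Int.powMod r f p
    else
      let us := bSplit rN mN 0
      let t := bPhi us.1
      let e := bELoop nN t 1 1
      PySem.Int.powMod r (e + t * us.2) p

-- ===== PRECONDITION & SPEC =====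
-- Pre_ excludes only p = 0, where A raises ZeroDivisionError on `a % p`.
def Pre_large_a_n_frac (a : Int) (n : Int) (p : Int) : Prop := p ≠ 0
instance (a : Int) (n : Int) (p : Int) : Decidable (Pre_large_a_n_frac a n p) := by
  unfold Pre_large_a_n_frac; infer_instance

def pvWitness_large_a_n_frac : Int × Int × Int := (3, 4, 5)

def Spec_large_a_n_frac (a : Int) (n : Int) (p : Int) (out : Int) : Prop := out = large_a_n_frac_alt a n p
instance (a : Int) (n : Int) (p : Int) (out : Int) : Decidable (Spec_large_a_n_frac a n p out) := by
  unfold Spec_large_a_n_frac; infer_instance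

-- ===== CLAIM (what is proved, stated in full; the proofs are below) =====
def Claim_equal_large_a_n_frac : Prop := ∀ (a : Int) (n : Int) (p : Int), Dom_large_a_n_frac a n p → Pre_large_a_n_frac a n p → Spec_large_a_n_frac a n p (large_a_n_frac a n p)

-- ===== LEMMAS AND PROOFS =====

-- Python mod: the residue differs from the argument by a multiple of the modulus
theorem pymod_sub_dvd (x p : Int) : p ∣ (x - PySem.Int.mod x p) := by
  have h := PySem.Int.floordiv_mul_add_mod x p
  exact ⟨PySem.Int.floordiv x p, by linarith⟩

-- congruent numbers have the same Python residue
theorem pymod_eq_of_dvd {p x y : Int} (hp : p ≠ 0) (h : p ∣ x - y) :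
    PySem.Int.mod x p = PySem.Int.mod y p := by
  have hx := pymod_sub_dvd x p
  have hy := pymod_sub_dvd y p
  have hd : p ∣ (PySem.Int.mod x p - PySem.Int.mod y p) := by
    have : PySem.Int.mod x p - PySem.Int.mod y p = (x - y) - (x - PySem.Int.mod x p) + (y - PySem.Int.mod y p) := by ring
    rw [this]; exact dvd_add (dvd_sub h hx) hy
  have habs : |PySem.Int.mod x p - PySem.Int.mod y p| < |p| := by
    rcases lt_or_gt_of_ne hp with hneg | hpos
    · have b1 := PySem.Int.mod_neg_bounds (a := x) hneg
      have b2 := PySem.Int.mod_neg_bounds (a := y) hneg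
      rw [abs_of_neg hneg] at *
      rw [abs_lt]; constructor <;> linarith [b1.1, b1.2, b2.1, b2.2]
    · have b1l := PySem.Int.mod_nonneg (a := x) hpos
      have b1r := PySem.Int.mod_lt (a := x) hpos
      have b2l := PySem.Int.mod_nonneg (a := y) hpos
      have b2r := PySem.Int.mod_lt (a := y) hpos
      rw [abs_of_pos hpos, abs_lt]; constructor <;> linarith
  have h0 : PySem.Int.mod x p - PySem.Int.mod y p = 0 :=
    Int.eq_zero_of_abs_lt_dvd ((abs_dvd p _).2 hd) habs
  linarith

-- powMod of congruent bases agree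
theorem powMod_congr {p x y : Int} (hp : p ≠ 0) (h : p ∣ x - y) (k : Nat) :
    PySem.Int.powMod x k p = PySem.Int.powMod y k p := by
  unfold PySem.Int.powMod
  exact pymod_eq_of_dvd hp (dvd_trans h (sub_dvd_pow_sub_pow x y k))

-- ===== A characterised: the chain computes a^(n!) mod p =====
theorem aChain (a p : Int) (hp : p ≠ 0) : ∀ N : Int, 1 ≤ N →
    (PySem.List.pyRange 1 (N + 1) 1).foldl
      (fun res i => if i = 1 then PySem.Int.mod a p else PySem.Int.powMod res i.toNat p) 1
    = PySem.Int.mod (a ^ Nat.factorial N.toNat) p := by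
  intro N
  refine Int.le_induction ?_ ?_ N
  · rw [show (1 : Int) + 1 = 1 + 1 from rfl, PySem.List.pyRange_one_singleton]
    simp
  · intro N hN ih
    rw [PySem.List.pyRange_one_succ_right (by omega : (1 : Int) ≤ N + 1),
      List.foldl_append, ih]
    simp only [List.foldl_cons, List.foldl_nil]
    rw [if_neg (by omega : ¬ (N + 1 = 1))]
    have hcongr : PySem.Int.powMod (PySem.Int.mod (a ^ Nat.factorial N.toNat) p)
        ((N + 1).toNat) p = PySem.Int.powMod (a ^ Nat.factorial N.toNat) ((N + 1).toNat) p := by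
      refine powMod_congr hp ?_ _
      have h := pymod_sub_dvd (a ^ Nat.factorial N.toNat) p
      rw [← neg_sub]
      exact dvd_neg.2 h
    rw [hcongr]
    unfold PySem.Int.powMod
    rw [← pow_mul]
    congr 2
    have ht : (N + 1).toNat = N.toNat + 1 := by omega
    rw [ht, Nat.factorial_succ, mul_comm]

-- ===== B loop characterisations =====
theorem bGcd_eq (x y : Nat) : bGcd x y = Nat.gcd x y := by
  rw [bGcd]
  split
  · rename_i h; simp [h]
  · rename_i h
    rw [bGcd_eq y (x % y), Nat.gcd_comm y (x % y), ← Nat.gcd_rec y x, Nat.gcd_comm y x]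
termination_by y
decreasing_by rename_i h; exact Nat.mod_lt x (Nat.pos_of_ne_zero h)

theorem bStrip_spec0 (q x : Nat) (hq : 2 ≤ q) (hx : x ≠ 0) :
    ∃ k, x = q ^ k * bStrip q x ∧ ¬ q ∣ bStrip q x := by
  rw [bStrip]
  split
  · rename_i h
    have hq' : 0 < q := by omega
    have hdvd : q ∣ x := (Nat.dvd_iff_mod_eq_zero).2 h.1
    have hx' : x / q ≠ 0 := by
      intro h0
      have := Nat.div_mul_cancel hdvd
      rw [h0] at this; simp at this; exact hx this.symm
    obtain ⟨k, hk1, hk2⟩ := bStrip_spec0 q (x / q) hq hx'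
    exact ⟨k + 1, by rw [pow_succ, mul_comm (q ^ k) q, mul_assoc, ← hk1,
      Nat.mul_div_cancel' hdvd], hk2⟩
  · rename_i h
    refine ⟨0, by simp, ?_⟩
    intro hdvd
    have : x % q = 0 := (Nat.dvd_iff_mod_eq_zero).1 hdvd
    exact h ⟨this, hq, hx⟩
termination_by x
decreasing_by rename_i h; exact Nat.div_lt_self (Nat.pos_of_ne_zero h.2.2) h.2.1

theorem bStrip_spec (q x : Nat) (hq : 2 ≤ q) (hx : x ≠ 0) (hd : q ∣ x) :
    ∃ k, 1 ≤ k ∧ x = q ^ k * bStrip q x ∧ ¬ q ∣ bStrip q x := by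
  obtain ⟨k, hk1, hk2⟩ := bStrip_spec0 q x hq hx
  refine ⟨k, ?_, hk1, hk2⟩
  rcases Nat.eq_zero_or_pos k with h0 | h1
  · subst h0; simp at hk1; rw [hk1] at hd; exact absurd hd hk2
  · exact h1

theorem bPhiLoop_spec (q x res d : Nat) (hq : 2 ≤ q) (hx : 1 ≤ x) (hd : 1 ≤ d)
    (hmin : ∀ r : Nat, r.Prime → r ∣ x → q ≤ r) (hco : Nat.Coprime d x)
    (hres : res = Nat.totient d * x) :
    bPhiLoop q x res = Nat.totient (d * x) := by
  rw [bPhiLoop]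
  split
  · rename_i hqq
    split
    · rename_i hmod
      have hdvd : q ∣ x := (Nat.dvd_iff_mod_eq_zero).2 hmod
      have hqprime : q.Prime := by
        have h1 : Nat.minFac q ∣ x := dvd_trans (Nat.minFac_dvd q) hdvd
        have h2 : q ≤ Nat.minFac q := hmin _ (Nat.minFac_prime (by omega)) h1
        have h3 : Nat.minFac q ≤ q := Nat.minFac_le (by omega)
        rw [Nat.prime_def_minFac]
        exact ⟨hq, le_antisymm h3 h2⟩
      obtain ⟨k, hk1, hxeq, hknd⟩ := bStrip_spec q x hq (by omega) hdvd
      set x' := bStrip q x with hx'def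
      have hx'dvd : x' ∣ x := ⟨q ^ k, by rw [hxeq]; ring⟩
      have hqkdvd : q ^ k ∣ x := ⟨x', hxeq⟩
      have hx'pos : 1 ≤ x' := by
        rcases Nat.eq_zero_or_pos x' with h0 | h1
        · rw [h0, mul_zero] at hxeq; omega
        · exact h1
      have hcodq : Nat.Coprime d (q ^ k) := hco.coprime_dvd_right hqkdvd
      have hsub : res - res / q = Nat.totient (d * q ^ k) * x' := by
        rw [hres, Nat.mul_div_assoc _ hdvd, ← Nat.mul_sub, Nat.totient_mul hcodq,
          Nat.totient_prime_pow hqprime (by omega)]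
        have hxq : x / q = q ^ (k - 1) * x' := by
          have hxx : x = q * (q ^ (k - 1) * x') := by
            rw [hxeq]
            conv_lhs => rw [show k = (k - 1) + 1 by omega]
            ring
          rw [hxx, Nat.mul_div_cancel_left _ (by omega : 0 < q)]
        have harith : x - x / q = q ^ (k - 1) * (q - 1) * x' := by
          rw [hxq]
          have hxx : x = q ^ (k - 1) * x' * q := by
            rw [hxeq]
            conv_lhs => rw [show k = (k - 1) + 1 by omega]
            ring
          rw [hxx]
          have h2 : q ^ (k - 1) * x' * q - q ^ (k - 1) * x'
              = q ^ (k - 1) * x' * (q - 1) := by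
            rw [Nat.mul_sub, mul_one]
          rw [h2]; ring
        rw [harith]; ring
      have hres' := bPhiLoop_spec (q + 1) x' (res - res / q) (d * q ^ k)
        (by omega) hx'pos
        (Nat.one_le_iff_ne_zero.2 (by positivity))
        (by
          intro r hrp hrd
          have h1 : q ≤ r := hmin r hrp (dvd_trans hrd hx'dvd)
          have h2 : r ≠ q := by
            intro he; rw [he] at hrd; exact hknd hrd
          omega)
        (Nat.Coprime.mul_left (hco.coprime_dvd_right hx'dvd)
          (Nat.Coprime.pow_left k ((Nat.Prime.coprime_iff_not_dvd hqprime).2 hknd)))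
        hsub
      rw [hres']
      congr 1
      rw [hxeq]; ring
    · rename_i hmod
      have hnd : ¬ q ∣ x := fun hdvd => hmod ((Nat.dvd_iff_mod_eq_zero).1 hdvd)
      refine bPhiLoop_spec (q + 1) x res d (by omega) hx hd ?_ hco hres
      intro r hrp hrd
      have h1 : q ≤ r := hmin r hrp hrd
      have h2 : r ≠ q := by intro he; rw [he] at hrd; exact hnd hrd
      omega
  · rename_i hqq
    split
    · rename_i hx1
      have hxprime : x.Prime := by
        by_contra hnp
        have h1 := Nat.minFac_sq_le_self (by omega) hnp
        have h2 : q ≤ Nat.minFac x := hmin _ (Nat.minFac_prime (by omega)) (Nat.minFac_dvd x)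
        have h3 : x < q * q := by omega
        nlinarith [h1, h2, h3]
      rw [hres, Nat.mul_div_cancel _ (by omega : 0 < x), Nat.totient_mul hco,
        Nat.totient_prime hxprime, Nat.mul_sub, mul_one]
    · rename_i hx1
      have hx1' : x = 1 := by omega
      subst hx1'
      rw [hres]; simp
termination_by 2 * x + 2 - q
decreasing_by
  all_goals
    have h1 : bStrip q x ≤ x := bStrip_le_self q x
    have hqq' : q * q ≤ x := by assumption
    have h2 : q ≤ x := le_trans (Nat.le_mul_of_pos_left q (by omega)) hqq'
    omega

theorem bPhi_eq (m : Nat) (hm : 1 ≤ m) : bPhi m = Nat.totient m := by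
  have h := bPhiLoop_spec 2 m m 1 (le_refl 2) hm (le_refl 1)
    (fun r hr _ => hr.two_le) (Nat.coprime_one_left m) (by simp)
  simpa [bPhi] using h

theorem bSplit_spec (r : Nat) (hr : r ≠ 0) : ∀ u s : Nat, u ≠ 0 →
    (bSplit r u s).1 ≠ 0 ∧ Nat.Coprime (bSplit r u s).1 r ∧ s ≤ (bSplit r u s).2 ∧
    ∃ v, u = (bSplit r u s).1 * v ∧ v ∣ r ^ ((bSplit r u s).2 - s) ∧
      2 ^ ((bSplit r u s).2 - s) ≤ v := by
  intro u s hu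
  rw [bSplit]
  simp only [bGcd_eq]
  split
  · rename_i h
    have hg : 1 < Nat.gcd u r := h.1
    have hgd : Nat.gcd u r ∣ u := Nat.gcd_dvd_left u r
    have hgr : Nat.gcd u r ∣ r := Nat.gcd_dvd_right u r
    have hu' : u / Nat.gcd u r ≠ 0 := by
      intro h0
      have := Nat.div_mul_cancel hgd
      rw [h0, zero_mul] at this
      exact hu this.symm
    obtain ⟨hne, hco, hle, v, hv1, hv2, hv3⟩ := bSplit_spec r hr (u / Nat.gcd u r) (s + 1) hu'
    rw [bSplit] at hne hco hle hv1 hv2 hv3 ⊢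
    refine ⟨hne, hco, by omega, Nat.gcd u r * v, ?_, ?_, ?_⟩
    · calc u = Nat.gcd u r * (u / Nat.gcd u r) := (Nat.mul_div_cancel' hgd).symm
        _ = Nat.gcd u r * (_ * v) := by rw [← hv1]
        _ = _ := by ring
    · have hexp : ∀ d : Nat, s + 1 ≤ d → d - s = (d - (s + 1)) + 1 := by omega
      rw [hexp _ hle, pow_succ, mul_comm (Nat.gcd u r) v]
      exact mul_dvd_mul hv2 hgr
    · have hexp : ∀ d : Nat, s + 1 ≤ d → d - s = (d - (s + 1)) + 1 := by omega
      rw [hexp _ hle, pow_succ]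
      calc 2 ^ _ * 2 ≤ v * Nat.gcd u r := Nat.mul_le_mul hv3 hg
        _ = Nat.gcd u r * v := mul_comm _ _
  · rename_i h
    have hco : Nat.Coprime u r := by
      have h1 : ¬ 1 < Nat.gcd u r ∨ ¬ u ≠ 0 := by tauto
      have hpos : 0 < Nat.gcd u r := Nat.gcd_pos_of_pos_left r (Nat.pos_of_ne_zero hu)
      unfold Nat.Coprime
      rcases h1 with h1 | h1
      · omega
      · exact absurd hu h1
    exact ⟨hu, hco, le_refl s, 1, by simp, by simp, by simp⟩
termination_by u s => u
decreasing_by rename_i h; exact Nat.div_lt_self (Nat.pos_of_ne_zero h.2) h.1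

theorem bFLoop_spec (nN m : Nat) : ∀ i f : Nat, 1 ≤ i → i ≤ nN + 1 →
    f = Nat.factorial (i - 1) →
    (bFLoop nN m i f < m → bFLoop nN m i f = Nat.factorial nN) ∧
    (m ≤ bFLoop nN m i f → m ≤ Nat.factorial nN) := by
  intro i f hi1 hi2 hf
  rw [bFLoop]
  split
  · rename_i h
    have hfact : f * i = Nat.factorial i := by
      rw [hf]
      conv_rhs => rw [show i = (i - 1) + 1 by omega]
      rw [Nat.factorial_succ, show i - 1 + 1 = i by omega, mul_comm]
    refine bFLoop_spec nN m (i + 1) (f * i) (by omega) (by omega) ?_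
    simpa using hfact
  · rename_i h
    constructor
    · intro hlt
      have hin : ¬ i ≤ nN := by
        intro hle; exact h ⟨hle, hlt⟩
      have : i = nN + 1 := by omega
      rw [hf, this]; simp
    · intro hge
      have hle : Nat.factorial (i - 1) ≤ Nat.factorial nN :=
        Nat.factorial_le (by omega)
      rw [hf] at hge; omega
termination_by i f => nN + 1 - i
decreasing_by omega

theorem bELoop_spec (nN t : Nat) (ht : 1 ≤ t) : ∀ i e : Nat, 1 ≤ i → i ≤ nN + 1 →
    e % t = Nat.factorial (i - 1) % t → (i = nN + 1 → e = Nat.factorial nN % t) →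
    bELoop nN t i e = Nat.factorial nN % t := by
  intro i e hi1 hi2 he hered
  rw [bELoop]
  split
  · rename_i h
    have hstep : e * i % t = Nat.factorial i % t := by
      calc e * i % t = e % t * i % t := by rw [Nat.mod_mul_mod]
        _ = Nat.factorial (i - 1) % t * i % t := by rw [he]
        _ = Nat.factorial (i - 1) * i % t := by rw [Nat.mod_mul_mod]
        _ = Nat.factorial i % t := by
              conv_rhs => rw [show i = (i - 1) + 1 by omega, Nat.factorial_succ]
              rw [show i - 1 + 1 = i by omega, mul_comm]
    split
    · rename_i h0
      rw [h0] at hstep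
      have hdvd : t ∣ Nat.factorial i := by
        have := hstep.symm
        exact (Nat.dvd_iff_mod_eq_zero).2 this
      have : t ∣ Nat.factorial nN := dvd_trans hdvd (Nat.factorial_dvd_factorial h)
      rw [(Nat.dvd_iff_mod_eq_zero).1 this]
    · rename_i h0
      refine bELoop_spec nN t ht (i + 1) (e * i % t) (by omega) (by omega) ?_ ?_
      · simpa using hstep
      · intro hiN
        have : i = nN := by omega
        rw [hstep, this]
  · rename_i h
    exact hered (by omega)
termination_by i e => nN + 1 - i
decreasing_by omega

-- Euler: exponents congruent mod φ(u) give congruent powers of a base coprime to u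
theorem pow_congr_mod_totient {R u : Nat} (hco : Nat.Coprime R u) (K1 K2 : Nat)
    (h : K1 % Nat.totient u = K2 % Nat.totient u) : R ^ K1 ≡ R ^ K2 [MOD u] := by
  have key : ∀ K : Nat, R ^ K ≡ R ^ (K % Nat.totient u) [MOD u] := by
    intro K
    conv_lhs => rw [← Nat.div_add_mod K (Nat.totient u)]
    rw [pow_add, pow_mul]
    calc (R ^ Nat.totient u) ^ (K / Nat.totient u) * R ^ (K % Nat.totient u)
        ≡ 1 ^ (K / Nat.totient u) * R ^ (K % Nat.totient u) [MOD u] :=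
          Nat.ModEq.mul (Nat.ModEq.pow _ (Nat.ModEq.pow_totient hco)) (Nat.ModEq.refl _)
      _ = R ^ (K % Nat.totient u) := by rw [one_pow, one_mul]
  calc R ^ K1 ≡ R ^ (K1 % Nat.totient u) [MOD u] := key K1
    _ = R ^ (K2 % Nat.totient u) := by rw [h]
    _ ≡ R ^ K2 [MOD u] := (key K2).symm

-- mod base congruence specialised: mod (a^K) p = mod (r^K) p when p ∣ a - r
theorem mod_pow_base_congr {p a r : Int} (hp : p ≠ 0) (h : p ∣ a - r) (K : Nat) :
    PySem.Int.mod (a ^ K) p = PySem.Int.mod (r ^ K) p :=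
  pymod_eq_of_dvd hp (dvd_trans h (sub_dvd_pow_sub_pow a r K))

theorem main_eq (a n p : Int) (hp : p ≠ 0) : large_a_n_frac a n p = large_a_n_frac_alt a n p := by
  unfold large_a_n_frac large_a_n_frac_alt
  by_cases h0 : PySem.Int.mod a p = 0
  · rw [if_pos h0, if_pos h0]
  · rw [if_neg h0, if_neg h0]
    by_cases hn : n < 1
    · rw [if_pos hn, PySem.List.pyRange_one_eq_nil (by omega : n + 1 ≤ 1)]
      rfl
    · rw [if_neg hn]
      have hA := aChain a p hp n (by omega)
      rw [hA]
      -- abbreviations matching the let-bindings of the B port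
      set mI : Int := if p > 0 then p else -p with hmI
      have hmpos : 0 < mI := by rw [hmI]; split <;> omega
      have hmdvd : ∀ z : Int, p ∣ z ↔ mI ∣ z := by
        intro z; rw [hmI]; split
        · exact Iff.rfl
        · exact (Int.neg_dvd).symm
      set r : Int := PySem.Int.mod a mI with hr
      have hrnz : r ≠ 0 := by
        intro hz
        have : mI ∣ a := (PySem.Int.mod_eq_zero_iff_dvd a mI).1 (by rw [← hr]; exact hz)
        exact h0 ((PySem.Int.mod_eq_zero_iff_dvd a p).2 ((hmdvd a).2 this))
      have hrnn : 0 ≤ r := by rw [hr]; exact PySem.Int.mod_nonneg (a := a) hmpos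
      have hrlt : r < mI := by rw [hr]; exact PySem.Int.mod_lt (a := a) hmpos
      have hbase : p ∣ a - r := by
        rw [hmdvd]
        exact pymod_sub_dvd a mI
      set nN : Nat := n.toNat with hnN
      have hnN1 : 1 ≤ nN := by omega
      set mN : Nat := mI.toNat with hmN
      have hmNI : (mN : Int) = mI := by omega
      set R : Nat := r.toNat with hR
      have hRI : (R : Int) = r := by omega
      have hRnz : R ≠ 0 := by omega
      have hRlt : R < mN := by omega
      have hmN2 : 2 ≤ mN := by omega
      -- n.toNat factorial: A's exponent
      have hF := bFLoop_spec nN mN 1 1 (le_refl 1) (by omega) (by simp)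
      by_cases hsmall : bFLoop nN mN 1 1 < mN
      · -- small path: the exact factorial fits below m
        rw [if_pos hsmall, hF.1 hsmall]
        unfold PySem.Int.powMod
        exact mod_pow_base_congr hp hbase _
      · -- big path
        rw [if_neg hsmall]
        have hFbig : mN ≤ Nat.factorial nN := hF.2 (by omega)
        obtain ⟨hU0, hcoUR, _, v, hv1, hv2, hv3⟩ :=
          bSplit_spec R hRnz mN 0 (by omega)
        set U : Nat := (bSplit R mN 0).1 with hU
        set S : Nat := (bSplit R mN 0).2 with hS
        rw [Nat.sub_zero] at hv2 hv3
        set t : Nat := bPhi U with htdef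
        have htt : t = Nat.totient U := bPhi_eq U (Nat.one_le_iff_ne_zero.2 hU0)
        have ht1 : 1 ≤ t := by
          rw [htt]
          exact (Nat.totient_pos).2 (Nat.pos_of_ne_zero hU0)
        have he : bELoop nN t 1 1 = Nat.factorial nN % t := by
          refine bELoop_spec nN t ht1 1 1 (le_refl 1) (by omega) (by simp) ?_
          intro h1; omega
        set e : Nat := bELoop nN t 1 1 with hedef
        have hee : e = Nat.factorial nN % t := he
        -- the two exponents are congruent mod mN at the base R
        have hexpU : R ^ Nat.factorial nN ≡ R ^ (e + t * S) [MOD U] := by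
          refine pow_congr_mod_totient hcoUR.symm _ _ ?_
          rw [← htt, Nat.add_mul_mod_self_left, hee]
          simp [Nat.mod_mod_of_dvd]
        have hvle : v ≤ mN := Nat.le_of_dvd (by omega) ⟨U, by rw [hv1]; ring⟩
        have hSlt : S < v := lt_of_lt_of_le (Nat.lt_two_pow_self) hv3
        have hSF : S ≤ Nat.factorial nN := by omega
        have hSE : S ≤ e + t * S := le_trans (Nat.le_mul_of_pos_left S ht1)
          (Nat.le_add_left _ _)
        have hexpV : R ^ Nat.factorial nN ≡ R ^ (e + t * S) [MOD v] := by
          have hz1 : R ^ Nat.factorial nN ≡ 0 [MOD v] :=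
            (Nat.modEq_zero_iff_dvd).2 (dvd_trans hv2 (pow_dvd_pow R hSF))
          have hz2 : R ^ (e + t * S) ≡ 0 [MOD v] :=
            (Nat.modEq_zero_iff_dvd).2 (dvd_trans hv2 (pow_dvd_pow R hSE))
          exact hz1.trans hz2.symm
        have hcoUv : Nat.Coprime U v :=
          Nat.Coprime.coprime_dvd_right hv2 (hcoUR.pow_right S)
        have hmod : R ^ Nat.factorial nN ≡ R ^ (e + t * S) [MOD mN] := by
          rw [hv1]
          exact (Nat.modEq_and_modEq_iff_modEq_mul hcoUv).1 ⟨hexpU, hexpV⟩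
        -- lift to the Python residues
        have hdvd : p ∣ (r ^ Nat.factorial nN - r ^ (e + t * S)) := by
          rw [hmdvd, ← hmNI, ← hRI]
          have h2 := hmod.dvd
          rw [← neg_sub]
          refine dvd_neg.2 ?_
          push_cast at h2 ⊢
          exact h2
        calc PySem.Int.mod (a ^ Nat.factorial nN) p
            = PySem.Int.mod (r ^ Nat.factorial nN) p := mod_pow_base_congr hp hbase _
          _ = PySem.Int.mod (r ^ (e + t * S)) p := pymod_eq_of_dvd hp hdvd
          _ = PySem.Int.powMod r (e + t * S) p := rfl

-- ===== VERDICT (by name: the statement is the Claim_ definition above) =====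
theorem large_a_n_frac_spec : Claim_equal_large_a_n_frac := by
  intro a n p _ hpre
  unfold Spec_large_a_n_frac
  exact main_eq a n p hpre
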